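-- pv_equiv track=rewrite | github.com/ajin-UN/AI | Informed_Greedy_Search/greedy_search.py | store_queens
-- ===== SOURCE A (Python) =====
-- QUEENS = 10
--
-- def store_queens(board):
--     result = [0 for a in range(QUEENS)]
--     for j in range(len(board)):
--         for i in range(len(board)):
--             if board[i][j] == 1:
--                 result[j] = i
--                 break
--     return result
-- ===== SOURCE B (Python) =====
-- def store_queens(board):
--     result = [0] * 10
--     filled = set()
--     n = len(board)
--     for i in range(n):
--         row = board[i]
--         for j in range(n):
--             if row[j] == 1 and j not in filled:
--                 result[j] = i
--                 filled.add(j)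
--     return result
-- ===== Notes on version B (the rewrite author's own statement) =====
-- stated objective: alternative
-- what changed: Replaces A's column-major scan with an early break per column by a single row-major sweep that keeps result[j] at the first row seen and maintains a set of already-resolved columns.
-- outside the precondition, e.g. on store_queens([[1, 1], [1]]): A returns [0, 0, 0, 0, 0, 0, 0, 0, 0, 0], B raises IndexError
import Mathlib
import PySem

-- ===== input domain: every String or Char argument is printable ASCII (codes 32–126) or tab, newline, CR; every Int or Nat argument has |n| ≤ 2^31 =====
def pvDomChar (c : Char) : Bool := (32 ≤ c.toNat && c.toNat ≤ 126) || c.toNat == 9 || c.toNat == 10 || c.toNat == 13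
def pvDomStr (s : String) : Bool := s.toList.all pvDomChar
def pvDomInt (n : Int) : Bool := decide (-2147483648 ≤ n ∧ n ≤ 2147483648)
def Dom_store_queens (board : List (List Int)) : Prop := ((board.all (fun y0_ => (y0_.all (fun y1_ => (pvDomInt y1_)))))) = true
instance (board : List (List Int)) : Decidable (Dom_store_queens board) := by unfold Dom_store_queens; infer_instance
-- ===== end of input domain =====

-- B changes the traversal, not the result: a row-major sweep with a set of resolved
-- columns instead of A's column-major scan with break (objective: alternative).

-- ===== PORT A =====
-- Inner `for i in range(len(board))` loop with its `break`: recursion over the list of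
-- row indices; `board[i][j]` is in range for every input admitted by Pre_, so getD is exact there.
def aFindSet (board : List (List Int)) (j : Nat) : List Nat → List Int → List Int
  | [], result => result
  | i :: rest, result =>
    if (board.getD i []).getD j 0 = 1 then result.set j (Int.ofNat i)
    else aFindSet board j rest result

def store_queens (board : List (List Int)) : List Int :=
  (List.range board.length).foldl
    (fun result j => aFindSet board j (List.range board.length) result)
    (List.replicate 10 0)

-- ===== PORT B =====
-- Inner `for j in range(n)` loop of Source B: updates (result, filled) in place;
-- `row[j]` is in range for every input admitted by Pre_, so getD is exact there.
def bRow (row : List Int) (i : Nat) : List Nat → List Int × PySem.Set Nat → List Int × PySem.Set Nat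
  | [], st => st
  | j :: rest, (result, filled) =>
    if row.getD j 0 = 1 ∧ j ∉ filled then
      bRow row i rest (result.set j (Int.ofNat i), PySem.Set.add filled j)
    else bRow row i rest (result, filled)

def store_queens_alt (board : List (List Int)) : List Int :=
  ((List.range board.length).foldl
    (fun st i => bRow (board.getD i []) i (List.range board.length) st)
    (List.replicate 10 0, PySem.Set.empty)).1

-- ===== PRECONDITION & SPEC =====
-- Pre_ excludes boards where an index goes out of range and Python raises IndexError (a row
-- shorter than the number of rows, or more than 10 rows); boards of more than 10 rows whose
-- high columns happen to hold no queen (A's break then dodges the raise) are excluded with them.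
def Pre_store_queens (board : List (List Int)) : Prop :=
  board.length ≤ 10 ∧ ∀ row ∈ board, board.length ≤ row.length
instance (board : List (List Int)) : Decidable (Pre_store_queens board) := by
  unfold Pre_store_queens; infer_instance

def pvWitness_store_queens : List (List Int) := [[0, 1], [1, 0]]

def Spec_store_queens (board : List (List Int)) (out : List Int) : Prop := out = store_queens_alt board
instance (board : List (List Int)) (out : List Int) : Decidable (Spec_store_queens board out) := by unfold Spec_store_queens; infer_instance

-- ===== CLAIM (what is proved, stated in full; the proofs are below) =====
def Claim_equal_store_queens : Prop := ∀ (board : List (List Int)), Dom_store_queens board → Pre_store_queens board → Spec_store_queens board (store_queens board)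

-- ===== LEMMAS AND PROOFS =====

-- A's inner loop is: find the first row index holding 1 in column j, write it at slot j.
theorem aFindSet_eq (board : List (List Int)) (j : Nat) (l : List Nat) (r : List Int) :
    aFindSet board j l r =
      match l.find? (fun i => decide ((board.getD i []).getD j 0 = 1)) with
      | some i => r.set j (Int.ofNat i)
      | none => r := by
  induction l with
  | nil => simp [aFindSet]
  | cons i rest ih =>
    by_cases h : (board.getD i []).getD j 0 = 1
    · rw [List.find?_cons_of_pos (by simpa using h)]
      simp only [aFindSet, if_pos h]
    · rw [List.find?_cons_of_neg (by simpa using h)]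
      simp only [aFindSet, if_neg h]
      exact ih

-- Element k of A's column-major fold.
theorem A_elem (board : List (List Int)) (k : Nat) (l : List Nat) :
    ∀ (r : List Int),
      (l.foldl (fun result j => aFindSet board j (List.range board.length) result) r)[k]? =
      if k ∈ l then
        match (List.range board.length).find?
            (fun i => decide ((board.getD i []).getD k 0 = 1)) with
        | some i => if k < r.length then some (Int.ofNat i) else none
        | none => r[k]?
      else r[k]? := by
  induction l with
  | nil => intro r; simp
  | cons j rest ih =>
    intro r
    rw [List.foldl_cons, ih, aFindSet_eq]
    cases hfind : (List.range board.length).find?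
        (fun i => decide ((board.getD i []).getD j 0 = 1)) with
    | none =>
      by_cases hjk : j = k
      · subst hjk
        rw [hfind]
        by_cases hmem : j ∈ rest
        · rw [if_pos hmem, if_pos (by simp)]
        · rw [if_neg hmem, if_pos (by simp)]
      · exact if_congr (by simp [Ne.symm hjk]) rfl rfl
    | some i =>
      by_cases hjk : j = k
      · subst hjk
        rw [hfind]
        by_cases hmem : j ∈ rest
        · rw [if_pos hmem, if_pos (by simp), List.length_set]
        · rw [if_neg hmem, if_pos (by simp), List.getElem?_set, if_pos rfl]
      · have hget : (r.set j (Int.ofNat i))[k]? = r[k]? := by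
          rw [List.getElem?_set]; simp [hjk]
        by_cases hmem : k ∈ rest
        · rw [if_pos hmem, if_pos (show k ∈ j :: rest by simp [hmem])]
          cases hC : (List.range board.length).find?
              (fun i' => decide ((board.getD i' []).getD k 0 = 1)) with
          | none => exact hget
          | some i' => rw [List.length_set]
        · rw [if_neg hmem, if_neg (show ¬ k ∈ j :: rest by simp [hmem, Ne.symm hjk])]
          exact hget

-- Membership in B's `filled` set after one row.
theorem bRow_snd (row : List Int) (i : Nat) (k : Nat) (js : List Nat) :
    ∀ (r : List Int) (s : PySem.Set Nat),
      (k ∈ (bRow row i js (r, s)).2 ↔ k ∈ s ∨ (k ∈ js ∧ row.getD k 0 = 1)) := by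
  induction js with
  | nil => intro r s; simp [bRow]
  | cons j rest ih =>
    intro r s
    by_cases h : row.getD j 0 = 1 ∧ j ∉ s
    · simp only [bRow, if_pos h]
      rw [ih]
      simp only [PySem.Set.mem_add, List.mem_cons]
      by_cases hk : k = j
      · subst hk; have := h.1; tauto
      · tauto
    · simp only [bRow, if_neg h]
      rw [ih]
      simp only [List.mem_cons]
      by_cases hk : k = j
      · subst hk
        rcases not_and_or.mp h with h1 | h2
        · tauto
        · simp only [not_not] at h2; tauto
      · tauto

theorem bRow_len (row : List Int) (i : Nat) (js : List Nat) :
    ∀ (r : List Int) (s : PySem.Set Nat), (bRow row i js (r, s)).1.length = r.length := by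
  induction js with
  | nil => intro r s; simp [bRow]
  | cons j rest ih =>
    intro r s
    by_cases h : row.getD j 0 = 1 ∧ j ∉ s
    · simp only [bRow, if_pos h]
      rw [ih, List.length_set]
    · simp only [bRow, if_neg h]
      exact ih r s

-- Element k of B's result after one row.
theorem bRow_fst (row : List Int) (i : Nat) (k : Nat) (js : List Nat) :
    ∀ (r : List Int) (s : PySem.Set Nat),
      (bRow row i js (r, s)).1[k]? =
      if k ∈ js ∧ row.getD k 0 = 1 ∧ k ∉ s then
        (if k < r.length then some (Int.ofNat i) else none)
      else r[k]? := by
  induction js with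
  | nil => intro r s; simp [bRow]
  | cons j rest ih =>
    intro r s
    by_cases h : row.getD j 0 = 1 ∧ j ∉ s
    · simp only [bRow, if_pos h]
      rw [ih]
      by_cases hk : k = j
      · subst hk
        rw [if_neg (by simp [PySem.Set.mem_add]),
            if_pos ⟨by simp, h.1, h.2⟩, List.getElem?_set, if_pos rfl]
      · have hcond : (k ∈ rest ∧ row.getD k 0 = 1 ∧ k ∉ PySem.Set.add s j) ↔
            (k ∈ j :: rest ∧ row.getD k 0 = 1 ∧ k ∉ s) := by
          simp only [PySem.Set.mem_add, List.mem_cons]; tauto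
        have hget : (r.set j (Int.ofNat i))[k]? = r[k]? := by
          rw [List.getElem?_set, if_neg (fun hh => hk hh.symm)]
        rw [List.length_set, hget]
        exact if_congr hcond rfl rfl
    · simp only [bRow, if_neg h]
      rw [ih]
      by_cases hk : k = j
      · subst hk
        rcases not_and_or.mp h with h1 | h2
        · rw [if_neg (fun hc => h1 hc.2.1), if_neg (fun hc => h1 hc.2.1)]
        · simp only [not_not] at h2
          rw [if_neg (fun hc => hc.2.2 h2), if_neg (fun hc => hc.2.2 h2)]
      · have hcond : (k ∈ rest ∧ row.getD k 0 = 1 ∧ k ∉ s) ↔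
            (k ∈ j :: rest ∧ row.getD k 0 = 1 ∧ k ∉ s) := by
          simp only [List.mem_cons]; tauto
        exact if_congr hcond rfl rfl

-- Element k of B's whole row-major sweep.
theorem B_outer (board : List (List Int)) (k : Nat) (is : List Nat) :
    ∀ (r : List Int) (s : PySem.Set Nat),
      ((is.foldl
        (fun st i => bRow (board.getD i []) i (List.range board.length) st) (r, s)).1)[k]? =
      if k ∈ s then r[k]?
      else if k < board.length then
        match is.find? (fun i => decide ((board.getD i []).getD k 0 = 1)) with
        | some i => if k < r.length then some (Int.ofNat i) else none
        | none => r[k]?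
      else r[k]? := by
  induction is with
  | nil =>
    intro r s
    by_cases hs : k ∈ s
    · rw [if_pos hs]; rfl
    · rw [if_neg hs]
      by_cases hn : k < board.length
      · rw [if_pos hn]; rfl
      · rw [if_neg hn]; rfl
  | cons i rest ih =>
    intro r s
    rw [List.foldl_cons,
        show bRow (board.getD i []) i (List.range board.length) (r, s) =
          ((bRow (board.getD i []) i (List.range board.length) (r, s)).1,
           (bRow (board.getD i []) i (List.range board.length) (r, s)).2) from rfl,
        ih]
    by_cases hs : k ∈ s
    · have h2 : k ∈ (bRow (board.getD i []) i (List.range board.length) (r, s)).2 :=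
        (bRow_snd _ _ _ _ _ _).mpr (Or.inl hs)
      have h1 : (bRow (board.getD i []) i (List.range board.length) (r, s)).1[k]? = r[k]? := by
        rw [bRow_fst]; exact if_neg (fun hc => hc.2.2 hs)
      rw [if_pos h2, if_pos hs, h1]
    · by_cases hn : k < board.length
      · by_cases hq : (board.getD i []).getD k 0 = 1
        · have h2 : k ∈ (bRow (board.getD i []) i (List.range board.length) (r, s)).2 :=
            (bRow_snd _ _ _ _ _ _).mpr (Or.inr ⟨List.mem_range.mpr hn, hq⟩)
          have h1 : (bRow (board.getD i []) i (List.range board.length) (r, s)).1[k]? =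
              (if k < r.length then some (Int.ofNat i) else none) := by
            rw [bRow_fst]; exact if_pos ⟨List.mem_range.mpr hn, hq, hs⟩
          rw [if_pos h2, if_neg hs, if_pos hn, h1,
              List.find?_cons_of_pos (by simpa using hq)]
        · have h2 : k ∉ (bRow (board.getD i []) i (List.range board.length) (r, s)).2 := by
            rw [bRow_snd]
            rintro (h' | ⟨_, hq'⟩)
            · exact hs h'
            · exact hq hq'
          have h1 : (bRow (board.getD i []) i (List.range board.length) (r, s)).1[k]? = r[k]? := by
            rw [bRow_fst]; exact if_neg (fun hc => hq hc.2.1)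
          have hlen := bRow_len (board.getD i []) i (List.range board.length) r s
          rw [if_neg h2, if_neg hs, if_pos hn, if_pos hn, hlen, h1,
              List.find?_cons_of_neg (by simpa using hq)]
      · have hmem : k ∉ List.range board.length := by simpa using hn
        have h2 : k ∉ (bRow (board.getD i []) i (List.range board.length) (r, s)).2 := by
          rw [bRow_snd]
          rintro (h' | ⟨hm, _⟩)
          · exact hs h'
          · exact hmem hm
        have h1 : (bRow (board.getD i []) i (List.range board.length) (r, s)).1[k]? = r[k]? := by
          rw [bRow_fst]; exact if_neg (fun hc => hmem hc.1)
        rw [if_neg h2, if_neg hs, if_neg hn, if_neg hn, h1]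

theorem ports_agree (board : List (List Int)) : store_queens board = store_queens_alt board := by
  apply List.ext_getElem?
  intro k
  unfold store_queens store_queens_alt
  rw [A_elem, B_outer]
  by_cases hn : k < board.length
  · rw [if_pos (List.mem_range.mpr hn), if_neg (by simp [PySem.Set.empty]), if_pos hn]
  · rw [if_neg (fun h => hn (List.mem_range.mp h)), if_neg (by simp [PySem.Set.empty]),
        if_neg hn]

-- ===== VERDICT (by name: the statement is the Claim_ definition above) =====
theorem store_queens_spec : Claim_equal_store_queens := by
  intro board _ _
  unfold Spec_store_queens
  exact ports_agree board
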